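-- pv_equiv track=rewrite | github.com/Gritzpup/project-sanctuary | the-luminal-archive/memory-backup/ACTIVE_SYSTEM/memory_checkpoint.py | get_emotional_pattern
-- ===== SOURCE A (Python) =====
-- def get_emotional_pattern(emotional_history):
--     """Analyze emotional pattern"""
--     if not emotional_history:
--         return "stable and caring"
--
--     recent_emotions = [e.get('emotion', '') for e in list(emotional_history)[-10:]]
--
--     if any('loving' in e or 'love' in e for e in recent_emotions):
--         return "deeply affectionate"
--     elif any('vulnerable' in e for e in recent_emotions):
--         return "needing reassurance"
--     elif any('excited' in e or 'happy' in e for e in recent_emotions):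
--         return "joyful and engaged"
--     else:
--         return "present and connected"
-- ===== SOURCE B (Python) =====
-- def get_emotional_pattern(emotional_history):
--     """Analyze emotional pattern: rank each recent entry by priority, return label of best rank"""
--     if not emotional_history:
--         return "stable and caring"
--     labels = ("deeply affectionate", "needing reassurance",
--               "joyful and engaged", "present and connected")
--
--     def rank(entry):
--         e = entry.get('emotion', '')
--         if 'loving' in e or 'love' in e:
--             return 0
--         if 'vulnerable' in e:
--             return 1
--         if 'excited' in e or 'happy' in e:
--             return 2
--         return 3
--
--     best = min((rank(entry) for entry in list(emotional_history)[-10:]), default=3)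
--     return labels[best]
-- ===== Notes on version B (the rewrite author's own statement) =====
-- stated objective: alternative
-- what changed: B replaces A's per-category any() scans by a classify-then-minimize scheme: each recent entry is mapped to a numeric priority rank (0 love, 1 vulnerable, 2 excited, 3 other), the minimum rank over the window is taken, and the answer is a table lookup by that rank.
import Mathlib
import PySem

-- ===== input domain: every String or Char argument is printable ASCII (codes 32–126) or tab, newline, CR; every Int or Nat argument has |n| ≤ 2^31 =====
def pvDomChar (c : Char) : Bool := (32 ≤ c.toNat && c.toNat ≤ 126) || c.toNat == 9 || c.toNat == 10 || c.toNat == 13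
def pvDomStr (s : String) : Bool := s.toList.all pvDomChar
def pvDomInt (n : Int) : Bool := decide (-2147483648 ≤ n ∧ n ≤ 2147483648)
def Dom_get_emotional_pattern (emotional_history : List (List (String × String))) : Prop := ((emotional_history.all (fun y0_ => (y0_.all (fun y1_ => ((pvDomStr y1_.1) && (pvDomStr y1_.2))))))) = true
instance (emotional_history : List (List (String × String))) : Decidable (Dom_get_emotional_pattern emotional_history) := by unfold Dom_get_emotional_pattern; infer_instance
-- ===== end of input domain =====

-- B replaces A's per-category any() scans by classify-then-minimize: each recent entry gets a
-- numeric priority rank, the minimum rank is taken, and the answer is a table lookup.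

-- ===== PORT A =====
def get_emotional_pattern (emotional_history : List (List (String × String))) : String :=
  if emotional_history = [] then "stable and caring"
  else
    let recent_emotions :=
      (PySem.List.slice emotional_history (some (-10)) none).map
        (fun e => PySem.Dict.getD (PySem.Dict.mk e) "emotion" "")
    if recent_emotions.any (fun e => PySem.Str.isIn "loving" e || PySem.Str.isIn "love" e) then
      "deeply affectionate"
    else if recent_emotions.any (fun e => PySem.Str.isIn "vulnerable" e) then
      "needing reassurance"
    else if recent_emotions.any (fun e => PySem.Str.isIn "excited" e || PySem.Str.isIn "happy" e) then
      "joyful and engaged"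
    else
      "present and connected"

-- ===== PORT B =====
-- Source B's rank(entry): the priority class of one entry
def gepRank (entry : List (String × String)) : Nat :=
  let e := PySem.Dict.getD (PySem.Dict.mk entry) "emotion" ""
  if PySem.Str.isIn "loving" e || PySem.Str.isIn "love" e then 0
  else if PySem.Str.isIn "vulnerable" e then 1
  else if PySem.Str.isIn "excited" e || PySem.Str.isIn "happy" e then 2
  else 3

-- Source B's labels tuple
def gepLabels : List String :=
  ["deeply affectionate", "needing reassurance", "joyful and engaged", "present and connected"]

-- Python min(xs, default=3): 3 on the empty list, otherwise the minimum
def gepMin : List Nat → Nat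
  | [] => 3
  | h :: t => t.foldl Nat.min h

def get_emotional_pattern_alt (emotional_history : List (List (String × String))) : String :=
  if emotional_history = [] then "stable and caring"
  else
    let best := gepMin ((PySem.List.slice emotional_history (some (-10)) none).map gepRank)
    -- labels[best]: best ≤ 3 always, so the getD default is never used
    gepLabels.getD best ""

-- ===== PRECONDITION & SPEC =====
def Spec_get_emotional_pattern (emotional_history : List (List (String × String))) (out : String) : Prop := out = get_emotional_pattern_alt emotional_history
instance (emotional_history : List (List (String × String))) (out : String) : Decidable (Spec_get_emotional_pattern emotional_history out) := by unfold Spec_get_emotional_pattern; infer_instance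

-- ===== CLAIM (what is proved, stated in full; the proofs are below) =====
def Claim_equal_get_emotional_pattern : Prop := ∀ (emotional_history : List (List (String × String))), Dom_get_emotional_pattern emotional_history → Spec_get_emotional_pattern emotional_history (get_emotional_pattern emotional_history)

-- ===== LEMMAS AND PROOFS =====

theorem foldl_min_le (t : List Nat) (h k : Nat) :
    t.foldl Nat.min h ≤ k ↔ h ≤ k ∨ ∃ a ∈ t, a ≤ k := by
  induction t generalizing h with
  | nil => simp
  | cons a t ih =>
    simp only [List.foldl_cons, ih, min_le_iff, List.mem_cons]
    constructor
    · rintro ((h1 | h1) | ⟨b, hb, h1⟩)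
      · exact Or.inl h1
      · exact Or.inr ⟨a, Or.inl rfl, h1⟩
      · exact Or.inr ⟨b, Or.inr hb, h1⟩
    · rintro (h1 | ⟨b, rfl | hb, h1⟩)
      · exact Or.inl (Or.inl h1)
      · exact Or.inl (Or.inr h1)
      · exact Or.inr ⟨b, hb, h1⟩

theorem gepMin_le_iff (l : List Nat) (k : Nat) (hk : k < 3) :
    gepMin l ≤ k ↔ ∃ a ∈ l, a ≤ k := by
  cases l with
  | nil => simp [gepMin]; omega
  | cons h t =>
    simp only [gepMin, foldl_min_le, List.mem_cons]
    constructor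
    · rintro (h1 | ⟨b, hb, h1⟩)
      · exact ⟨h, Or.inl rfl, h1⟩
      · exact ⟨b, Or.inr hb, h1⟩
    · rintro ⟨b, rfl | hb, h1⟩
      · exact Or.inl h1
      · exact Or.inr ⟨b, hb, h1⟩

theorem gepRank_le_three (entry : List (String × String)) : gepRank entry ≤ 3 := by
  simp only [gepRank]; split_ifs <;> omega

theorem gepMin_le_three (es : List (List (String × String))) :
    gepMin (es.map gepRank) ≤ 3 := by
  cases es with
  | nil => simp [gepMin]
  | cons h t =>
    simp only [List.map_cons, gepMin, foldl_min_le]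
    exact Or.inl (gepRank_le_three h)

theorem gepRank_le_zero (entry : List (String × String)) :
    (gepRank entry ≤ 0) ↔
      (PySem.Str.isIn "loving" (PySem.Dict.getD (PySem.Dict.mk entry) "emotion" "")
        || PySem.Str.isIn "love" (PySem.Dict.getD (PySem.Dict.mk entry) "emotion" "")) = true := by
  simp only [gepRank]; split_ifs <;> simp_all

theorem gepRank_le_one (entry : List (String × String)) :
    (gepRank entry ≤ 1) ↔
      ((PySem.Str.isIn "loving" (PySem.Dict.getD (PySem.Dict.mk entry) "emotion" "")
        || PySem.Str.isIn "love" (PySem.Dict.getD (PySem.Dict.mk entry) "emotion" "")) = true ∨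
       PySem.Str.isIn "vulnerable" (PySem.Dict.getD (PySem.Dict.mk entry) "emotion" "") = true) := by
  simp only [gepRank]; split_ifs <;> simp_all

theorem gepRank_le_two (entry : List (String × String)) :
    (gepRank entry ≤ 2) ↔
      ((PySem.Str.isIn "loving" (PySem.Dict.getD (PySem.Dict.mk entry) "emotion" "")
        || PySem.Str.isIn "love" (PySem.Dict.getD (PySem.Dict.mk entry) "emotion" "")) = true ∨
       PySem.Str.isIn "vulnerable" (PySem.Dict.getD (PySem.Dict.mk entry) "emotion" "") = true ∨
       (PySem.Str.isIn "excited" (PySem.Dict.getD (PySem.Dict.mk entry) "emotion" "")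
        || PySem.Str.isIn "happy" (PySem.Dict.getD (PySem.Dict.mk entry) "emotion" "")) = true) := by
  simp only [gepRank]; split_ifs <;> simp_all

-- ===== VERDICT (by name: the statement is the Claim_ definition above) =====
theorem get_emotional_pattern_spec : Claim_equal_get_emotional_pattern := by
  intro eh _
  unfold Spec_get_emotional_pattern get_emotional_pattern get_emotional_pattern_alt
  by_cases he : eh = []
  · simp [he]
  · simp only [he, if_false]
    set es := PySem.List.slice eh (some (-10)) none with hes
    set m := gepMin (es.map gepRank) with hm
    have h3 : m ≤ 3 := gepMin_le_three es
    by_cases h0 : es.any (fun entry =>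
        PySem.Str.isIn "loving" (PySem.Dict.getD (PySem.Dict.mk entry) "emotion" "")
          || PySem.Str.isIn "love" (PySem.Dict.getD (PySem.Dict.mk entry) "emotion" "")) = true
    · have : m ≤ 0 := by
        rw [hm, gepMin_le_iff _ 0 (by omega)]
        obtain ⟨entry, hmem, hp⟩ := List.any_eq_true.mp h0
        exact ⟨gepRank entry, List.mem_map_of_mem hmem, (gepRank_le_zero entry).mpr hp⟩
      have hm0 : m = 0 := by omega
      simp only [List.any_map] at h0 ⊢
      rw [if_pos (by simpa using h0), hm0]
      rfl
    · have hn0 : ¬ m ≤ 0 := by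
        rw [hm, gepMin_le_iff _ 0 (by omega)]
        rintro ⟨a, ha, hle⟩
        obtain ⟨entry, hmem, rfl⟩ := List.mem_map.mp ha
        exact h0 (List.any_eq_true.mpr ⟨entry, hmem, (gepRank_le_zero entry).mp hle⟩)
      by_cases h1 : es.any (fun entry =>
          PySem.Str.isIn "vulnerable" (PySem.Dict.getD (PySem.Dict.mk entry) "emotion" "")) = true
      · have : m ≤ 1 := by
          rw [hm, gepMin_le_iff _ 1 (by omega)]
          obtain ⟨entry, hmem, hp⟩ := List.any_eq_true.mp h1
          exact ⟨gepRank entry, List.mem_map_of_mem hmem, (gepRank_le_one entry).mpr (Or.inr hp)⟩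
        have hm1 : m = 1 := by omega
        simp only [List.any_map] at h0 h1 ⊢
        rw [if_neg (by simpa using h0), if_pos (by simpa using h1), hm1]
        rfl
      · have hn1 : ¬ m ≤ 1 := by
          rw [hm, gepMin_le_iff _ 1 (by omega)]
          rintro ⟨a, ha, hle⟩
          obtain ⟨entry, hmem, rfl⟩ := List.mem_map.mp ha
          rcases (gepRank_le_one entry).mp hle with hp | hp
          · exact h0 (List.any_eq_true.mpr ⟨entry, hmem, hp⟩)
          · exact h1 (List.any_eq_true.mpr ⟨entry, hmem, hp⟩)
        by_cases h2 : es.any (fun entry =>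
            PySem.Str.isIn "excited" (PySem.Dict.getD (PySem.Dict.mk entry) "emotion" "")
              || PySem.Str.isIn "happy" (PySem.Dict.getD (PySem.Dict.mk entry) "emotion" "")) = true
        · have : m ≤ 2 := by
            rw [hm, gepMin_le_iff _ 2 (by omega)]
            obtain ⟨entry, hmem, hp⟩ := List.any_eq_true.mp h2
            exact ⟨gepRank entry, List.mem_map_of_mem hmem,
              (gepRank_le_two entry).mpr (Or.inr (Or.inr hp))⟩
          have hm2 : m = 2 := by omega
          simp only [List.any_map] at h0 h1 h2 ⊢
          rw [if_neg (by simpa using h0), if_neg (by simpa using h1),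
            if_pos (by simpa using h2), hm2]
          rfl
        · have hn2 : ¬ m ≤ 2 := by
            rw [hm, gepMin_le_iff _ 2 (by omega)]
            rintro ⟨a, ha, hle⟩
            obtain ⟨entry, hmem, rfl⟩ := List.mem_map.mp ha
            rcases (gepRank_le_two entry).mp hle with hp | hp | hp
            · exact h0 (List.any_eq_true.mpr ⟨entry, hmem, hp⟩)
            · exact h1 (List.any_eq_true.mpr ⟨entry, hmem, hp⟩)
            · exact h2 (List.any_eq_true.mpr ⟨entry, hmem, hp⟩)
          have hm3 : m = 3 := by omega
          simp only [List.any_map] at h0 h1 h2 ⊢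
          rw [if_neg (by simpa using h0), if_neg (by simpa using h1),
            if_neg (by simpa using h2), hm3]
          rfl
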